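-- pv_equiv track=rewrite | github.com/bssrdf/pyleet | M/MakeSumDivisiblebyP.py | minSubarray2
-- ===== SOURCE A (Python) =====
-- from typing import List
--
-- def minSubarray2(nums: List[int], p: int) -> int:
--     # Then the question become:
--     # Find the shortest array with sum % p = need.
--
--     # last[remainder] = index records the last index that
--     # (A[0] + A[1] + .. + A[i]) % p = remainder
--     A = nums
--     need = sum(A) % p
--     dp = {0: -1}
--     cur = 0
--     res = n = len(A)
--     for i, a in enumerate(A):
--         cur = (cur + a) % p
--         dp[cur] = i
--         if (cur - need) % p in dp:
--             res = min(res, i - dp[(cur - need) % p])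
--     return res if res < n else -1
-- ===== SOURCE B (Python) =====
-- from typing import List
--
-- def minSubarray2(nums: List[int], p: int) -> int:
--     # Brute force over prefix sums: a removed subarray is nums[a:b] for
--     # prefix indices 0 <= a <= b <= n (b >= 1); keep the shortest b - a whose
--     # removal leaves a sum divisible by p.
--     n = len(nums)
--     pref = [0]
--     s = 0
--     for x in nums:
--         s += x
--         pref.append(s)
--     total = s
--     best = n
--     for b in range(1, n + 1):
--         for a in range(b + 1):
--             if (pref[b] - pref[a] - total) % p == 0:
--                 best = min(best, b - a)
--     return best if best < n else -1
-- ===== Notes on version B (the rewrite author's own statement) =====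
-- stated objective: alternative
-- what changed: Replaces A's one-pass last-remainder hash table with an explicit prefix-sum array and a nested scan over all removable prefix-index pairs (a,b), keeping the shortest b-a whose removal leaves a sum divisible by p.
import Mathlib
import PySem

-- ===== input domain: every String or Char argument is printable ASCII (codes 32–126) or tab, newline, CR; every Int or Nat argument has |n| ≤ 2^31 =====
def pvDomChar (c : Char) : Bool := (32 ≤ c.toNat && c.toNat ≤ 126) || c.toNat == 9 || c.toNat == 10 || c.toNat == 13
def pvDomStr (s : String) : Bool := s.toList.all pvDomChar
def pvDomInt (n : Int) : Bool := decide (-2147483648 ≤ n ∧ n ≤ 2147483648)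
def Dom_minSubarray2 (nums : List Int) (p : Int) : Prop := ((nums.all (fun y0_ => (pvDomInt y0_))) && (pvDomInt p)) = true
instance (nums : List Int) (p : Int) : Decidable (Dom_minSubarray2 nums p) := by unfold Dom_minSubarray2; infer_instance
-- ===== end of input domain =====

-- B replaces A's one-pass last-remainder hash table with an explicit prefix-sum array and a
-- nested scan over all removable prefix-index pairs (alternative algorithm, not faster).


-- ===== PORT A =====
def minSubarray2 (nums : List Int) (p : Int) : Int :=
  let need := PySem.Int.mod nums.sum p
  let n : Int := PySem.List.len nums
  let st := (PySem.List.enumerate nums).foldl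
    (fun (s : Int × Int × PySem.Dict Int Int) (ia : Int × Int) =>
      let cur := PySem.Int.mod (s.1 + ia.2) p
      let dp := s.2.2.insert cur ia.1
      -- "if (cur - need) % p in dp: res = min(res, i - dp[(cur - need) % p])" as one guarded lookup
      match dp.get? (PySem.Int.mod (cur - need) p) with
      | some j => (cur, min s.2.1 (ia.1 - j), dp)
      | none => (cur, s.2.1, dp))
    (0, n, (PySem.Dict.empty : PySem.Dict Int Int).insert 0 (-1))
  if st.2.1 < n then st.2.1 else -1

-- ===== PORT B =====
def minSubarray2_alt (nums : List Int) (p : Int) : Int :=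
  let n : Int := PySem.List.len nums
  -- 's += x; pref.append(s)' — one loop carrying (s, pref)
  let sp := nums.foldl (fun (acc : Int × List Int) x => (acc.1 + x, acc.2 ++ [acc.1 + x])) (0, [0])
  let total := sp.1
  let pref := sp.2
  let best := (PySem.List.pyRange 1 (n + 1) 1).foldl (fun best b =>
      (PySem.List.pyRange 0 (b + 1) 1).foldl (fun best a =>
        -- pref[b], pref[a]: indices always in range (0 ≤ a ≤ b ≤ n, pref has length n+1)
        if PySem.Int.mod (PySem.List.pyGetD pref b 0 - PySem.List.pyGetD pref a 0 - total) p = 0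
        then min best (b - a) else best) best) n
  if best < n then best else -1

-- ===== PRECONDITION & SPEC =====
-- Pre_ excludes only p = 0, on which Python's '%' raises ZeroDivisionError (in A and in B alike).
def Pre_minSubarray2 (nums : List Int) (p : Int) : Prop := p ≠ 0
instance (nums : List Int) (p : Int) : Decidable (Pre_minSubarray2 nums p) := by unfold Pre_minSubarray2; infer_instance
def pvWitness_minSubarray2 : List Int × Int := ([3, 1, 4, 2], 6)

def Spec_minSubarray2 (nums : List Int) (p : Int) (out : Int) : Prop := out = minSubarray2_alt nums p
instance (nums : List Int) (p : Int) (out : Int) : Decidable (Spec_minSubarray2 nums p out) := by unfold Spec_minSubarray2; infer_instance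

-- ===== CLAIM (what is proved, stated in full; the proofs are below) =====
def Claim_equal_minSubarray2 : Prop := ∀ (nums : List Int) (p : Int), Dom_minSubarray2 nums p → Pre_minSubarray2 nums p → Spec_minSubarray2 nums p (minSubarray2 nums p)

-- ===== LEMMAS AND PROOFS =====

def preS (nums : List Int) (k : Nat) : Int := (nums.take k).sum

theorem mod_eq_mod_iff_dvd (p x y : Int) (hp : p ≠ 0) :
    PySem.Int.mod x p = PySem.Int.mod y p ↔ p ∣ (x - y) := by
  have hx := PySem.Int.floordiv_mul_add_mod x p
  have hy := PySem.Int.floordiv_mul_add_mod y p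
  constructor
  · intro h
    exact ⟨PySem.Int.floordiv x p - PySem.Int.floordiv y p, by rw [h] at hx; ring_nf; linarith⟩
  · rintro ⟨k, hk⟩
    have hdvd : p ∣ (PySem.Int.mod x p - PySem.Int.mod y p) :=
      ⟨k - PySem.Int.floordiv x p + PySem.Int.floordiv y p, by ring_nf; linarith⟩
    have habs : |PySem.Int.mod x p - PySem.Int.mod y p| < |p| := by
      rcases lt_or_gt_of_ne hp with hneg | hpos
      · have h1 := PySem.Int.mod_neg_bounds x hneg
        have h2 := PySem.Int.mod_neg_bounds y hneg
        rw [abs_lt, abs_of_neg hneg]; omega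
      · have h1 := PySem.Int.mod_nonneg x hpos
        have h2 := PySem.Int.mod_nonneg y hpos
        have h3 := PySem.Int.mod_lt x hpos
        have h4 := PySem.Int.mod_lt y hpos
        rw [abs_lt, abs_of_pos hpos]; omega
    have := Int.eq_zero_of_abs_lt_dvd ((abs_dvd p _).mpr hdvd) habs
    omega

theorem cond_equiv (nums : List Int) (p : Int) (hp : p ≠ 0) (a b : Nat) :
    (PySem.Int.mod (preS nums b - preS nums a - nums.sum) p = 0)
      ↔ PySem.Int.mod (preS nums a) p
          = PySem.Int.mod (PySem.Int.mod (preS nums b) p - PySem.Int.mod nums.sum p) p := by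
  have hb := PySem.Int.floordiv_mul_add_mod (preS nums b) p
  have ht := PySem.Int.floordiv_mul_add_mod nums.sum p
  rw [PySem.Int.mod_eq_zero_iff_dvd, mod_eq_mod_iff_dvd _ _ _ hp]
  constructor
  · rintro ⟨k, hk⟩
    exact ⟨PySem.Int.floordiv (preS nums b) p - PySem.Int.floordiv nums.sum p - k, by ring_nf; linarith⟩
  · rintro ⟨k, hk⟩
    exact ⟨PySem.Int.floordiv (preS nums b) p - PySem.Int.floordiv nums.sum p - k, by ring_nf; linarith⟩

def lastA (nums : List Int) (p : Int) : Nat → Int → Option Int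
  | 0, r => if r = 0 then some (-1) else none
  | Nat.succ k, r => if r = PySem.Int.mod (preS nums (k + 1)) p then some (k : Int) else lastA nums p k r

theorem lastA_bounds (nums : List Int) (p : Int) (m : Nat) (r : Int) (j : Int)
    (h : lastA nums p m r = some j) : -1 ≤ j ∧ j < (m : Int) := by
  induction m with
  | zero => simp [lastA] at h; omega
  | succ k ih =>
    simp only [lastA] at h
    split at h
    · cases h; constructor <;> omega
    · have := ih h; omega

theorem mod_zero_left (p : Int) : PySem.Int.mod 0 p = 0 := Int.zero_fmod p

theorem inner_eq (nums : List Int) (p : Int) (hp : p ≠ 0) (b k : Nat) (acc : Int) :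
    (PySem.List.pyRange 0 ((k : Int) + 1) 1).foldl (fun best a =>
        if PySem.Int.mod (preS nums b - preS nums (a.toNat) - nums.sum) p = 0
        then min best ((b : Int) - a) else best) acc
    = match lastA nums p k (PySem.Int.mod (PySem.Int.mod (preS nums b) p - PySem.Int.mod nums.sum p) p) with
      | some j => min acc ((b : Int) - (j + 1))
      | none => acc := by
  induction k generalizing acc with
  | zero =>
    rw [show ((0:Nat):Int) + 1 = 0 + 1 by norm_num, PySem.List.pyRange_one_singleton]
    simp only [List.foldl_cons, List.foldl_nil, lastA]
    have hc := cond_equiv nums p hp 0 b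
    simp only [preS, List.take_zero, List.sum_nil, mod_zero_left] at hc
    by_cases h : PySem.Int.mod (preS nums b - preS nums 0 - nums.sum) p = 0
    · have h0 : (0:Int) = PySem.Int.mod (PySem.Int.mod (preS nums b) p - PySem.Int.mod nums.sum p) p := by
        apply hc.mp; simpa [preS] using h
      rw [if_pos (by simpa [preS] using h), if_pos h0.symm]
      norm_num
    · rw [if_neg (by simpa [preS] using h), if_neg (fun he => h (by simpa [preS] using hc.mpr he.symm))]
  | succ k ih =>
    have hcast : ((k+1:Nat):Int) + 1 = ((k:Int)+1) + 1 := by push_cast; ring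
    rw [hcast, PySem.List.pyRange_one_succ_right (show (0:Int) ≤ (k:Int)+1 by omega), List.foldl_append]
    rw [ih]
    simp only [List.foldl_cons, List.foldl_nil, lastA]
    have hc := cond_equiv nums p hp (k+1) b
    have htn : ((k:Int)+1).toNat = k + 1 := by omega
    by_cases h : PySem.Int.mod (preS nums b - preS nums (k+1) - nums.sum) p = 0
    · rw [htn, if_pos h, if_pos (hc.mp h).symm]
      cases hl : lastA nums p k (PySem.Int.mod (PySem.Int.mod (preS nums b) p - PySem.Int.mod nums.sum p) p) with
      | none => rfl
      | some j =>
        have hb := lastA_bounds nums p k _ j hl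
        rw [min_assoc]
        congr 1
        exact min_eq_right (by omega)
    · rw [htn, if_neg h, if_neg (fun he => h (hc.mpr he.symm))]

theorem mod_add_left (p x y : Int) (hp : p ≠ 0) :
    PySem.Int.mod (PySem.Int.mod x p + y) p = PySem.Int.mod (x + y) p := by
  rw [mod_eq_mod_iff_dvd _ _ _ hp]
  have h := PySem.Int.floordiv_mul_add_mod x p
  exact ⟨-(PySem.Int.floordiv x p), by ring_nf; linarith⟩

def stA (nums : List Int) (p r0 : Int) (m : Nat) : Int × Int × PySem.Dict Int Int :=
  (PySem.List.enumerate (nums.take m)).foldl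
    (fun (s : Int × Int × PySem.Dict Int Int) (ia : Int × Int) =>
      let cur := PySem.Int.mod (s.1 + ia.2) p
      let dp := s.2.2.insert cur ia.1
      match dp.get? (PySem.Int.mod (cur - PySem.Int.mod nums.sum p) p) with
      | some j => (cur, min s.2.1 (ia.1 - j), dp)
      | none => (cur, s.2.1, dp))
    (0, r0, (PySem.Dict.empty : PySem.Dict Int Int).insert 0 (-1))

set_option maxRecDepth 10000 in
theorem loop_inv (nums : List Int) (p : Int) (hp : p ≠ 0) (r0 : Int) (m : Nat) (hm : m ≤ nums.length) :
    (stA nums p r0 m).1 = PySem.Int.mod (preS nums m) p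
    ∧ (∀ r, (stA nums p r0 m).2.2.get? r = lastA nums p m r)
    ∧ (stA nums p r0 m).2.1
      = (PySem.List.pyRange 1 ((m : Int) + 1) 1).foldl (fun best b =>
          (PySem.List.pyRange 0 (b + 1) 1).foldl (fun best a =>
            if PySem.Int.mod (preS nums (b.toNat) - preS nums (a.toNat) - nums.sum) p = 0
            then min best (b - a) else best) best) r0 := by
  induction m with
  | zero =>
    have h0 : nums.take 0 = [] := rfl
    refine ⟨?_, ?_, ?_⟩
    · simp [stA, h0, PySem.List.enumerate_nil, preS, mod_zero_left]
    · intro r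
      simp only [stA, h0, PySem.List.enumerate_nil, List.foldl_nil]
      rw [PySem.Dict.get?_insert]
      simp [lastA, PySem.Dict.get?_empty]
    · simp only [stA, h0, PySem.List.enumerate_nil, List.foldl_nil, Nat.cast_zero, zero_add]
      rw [PySem.List.pyRange_one_eq_nil (by omega)]
      rfl
  | succ k ih =>
    obtain ⟨ih1, ih2, ih3⟩ := ih (by omega)
    have hk : k < nums.length := by omega
    have htake : nums.take (k+1) = nums.take k ++ [nums[k]] := by
      rw [List.take_add_one, List.getElem?_eq_getElem hk]; rfl
    have hlen : (nums.take k).length = k := by simp [List.length_take]; omega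
    have hstep : stA nums p r0 (k+1)
        = (fun (s : Int × Int × PySem.Dict Int Int) (ia : Int × Int) =>
            let cur := PySem.Int.mod (s.1 + ia.2) p
            let dp := s.2.2.insert cur ia.1
            match dp.get? (PySem.Int.mod (cur - PySem.Int.mod nums.sum p) p) with
            | some j => (cur, min s.2.1 (ia.1 - j), dp)
            | none => (cur, s.2.1, dp)) (stA nums p r0 k) ((k : Int), nums[k]) := by
      rw [stA, htake, PySem.List.enumerate_append, List.foldl_append, hlen]
      rw [stA]
      simp only [PySem.List.enumerate_cons, PySem.List.enumerate_nil, List.foldl_cons, List.foldl_nil, zero_add]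
    have hpre : preS nums (k+1) = preS nums k + nums[k] := by
      unfold preS
      rw [htake, List.sum_append, List.sum_cons, List.sum_nil, add_zero]
    have hcur : PySem.Int.mod ((stA nums p r0 k).1 + nums[k]) p = PySem.Int.mod (preS nums (k+1)) p := by
      rw [ih1, mod_add_left _ _ _ hp, hpre]
    have hget : ∀ r, (((stA nums p r0 k).2.2.insert (PySem.Int.mod ((stA nums p r0 k).1 + nums[k]) p) (k : Int)).get? r)
        = lastA nums p (k+1) r := by
      intro r
      rw [PySem.Dict.get?_insert, hcur]
      simp only [lastA]
      split
      · rfl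
      · exact ih2 r
    refine ⟨?_, ?_, ?_⟩
    · rw [hstep]; simp only
      cases hq : (((stA nums p r0 k).2.2.insert (PySem.Int.mod ((stA nums p r0 k).1 + nums[k]) p) (k:Int)).get?
          (PySem.Int.mod (PySem.Int.mod ((stA nums p r0 k).1 + nums[k]) p - PySem.Int.mod nums.sum p) p)) <;>
        simp [hcur]
    · intro r
      rw [hstep]; simp only
      cases hq : (((stA nums p r0 k).2.2.insert (PySem.Int.mod ((stA nums p r0 k).1 + nums[k]) p) (k:Int)).get?
          (PySem.Int.mod (PySem.Int.mod ((stA nums p r0 k).1 + nums[k]) p - PySem.Int.mod nums.sum p) p)) <;>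
        · exact hget r
    · have hIE := inner_eq nums p hp (k+1) (k+1)
        ((PySem.List.pyRange 1 ((k:Int) + 1) 1).foldl (fun best b =>
          (PySem.List.pyRange 0 (b + 1) 1).foldl (fun best a =>
            if PySem.Int.mod (preS nums (b.toNat) - preS nums (a.toNat) - nums.sum) p = 0
            then min best (b - a) else best) best) r0)
      have hcast2 : (((k:Nat)+1 : Nat) : Int) = (k:Int)+1 := by push_cast; ring
      rw [hcast2] at hIE
      have hcast : ((k+1:Nat):Int) + 1 = ((k:Int)+1) + 1 := by push_cast; ring
      rw [hstep]; simp only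
      rw [hcast, PySem.List.pyRange_one_succ_right (show (1:Int) ≤ (k:Int)+1 by omega), List.foldl_append]
      simp only [List.foldl_cons, List.foldl_nil, show ((k:Int)+1).toNat = k+1 from by omega]
      rw [hIE, hget, hcur]
      cases hq : lastA nums p (k+1) (PySem.Int.mod (PySem.Int.mod (preS nums (k+1)) p - PySem.Int.mod nums.sum p) p) with
      | none => simp [ih3]
      | some j =>
        simp only [ih3]
        congr 1
        ring

theorem sp_fold (xs : List Int) (s0 : Int) (l0 : List Int) :
    xs.foldl (fun (acc : Int × List Int) x => (acc.1 + x, acc.2 ++ [acc.1 + x])) (s0, l0)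
    = (s0 + xs.sum, l0 ++ (List.range xs.length).map (fun k => s0 + (xs.take (k+1)).sum)) := by
  induction xs generalizing s0 l0 with
  | nil => simp
  | cons x xs ih =>
    simp only [List.foldl_cons]
    rw [ih]
    refine Prod.ext ?_ ?_
    · simp; ring
    · simp only [List.length_cons, List.range_succ_eq_map, List.map_cons, List.map_map]
      simp [Function.comp, List.take_succ_cons, add_assoc]

theorem pref_eq (nums : List Int) :
    (nums.foldl (fun (acc : Int × List Int) x => (acc.1 + x, acc.2 ++ [acc.1 + x])) (0, [0])).2
    = (List.range (nums.length + 1)).map (fun k => preS nums k) := by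
  rw [sp_fold]
  simp only [List.range_succ_eq_map, List.map_cons, List.map_map]
  simp [preS, Function.comp]

theorem pref_get (nums : List Int) (b : Int) (h0 : 0 ≤ b) (h1 : b ≤ (nums.length : Int)) :
    PySem.List.pyGetD ((List.range (nums.length + 1)).map (fun k => preS nums k)) b 0
      = preS nums b.toNat := by
  have hlen : (((List.range (nums.length + 1)).map (fun k => preS nums k)).length : Int) = (nums.length : Int) + 1 := by
    simp
  rw [PySem.List.pyGetD_eq_getElem _ _ h0 (by rw [hlen]; omega)]
  simp [List.getElem_map, List.getElem_range]
theorem ports_agree (nums : List Int) (p : Int) (hp : p ≠ 0) :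
    minSubarray2 nums p = minSubarray2_alt nums p := by
  have hA : minSubarray2 nums p
      = (if (stA nums p (nums.length : Int) nums.length).2.1 < (nums.length : Int)
         then (stA nums p (nums.length : Int) nums.length).2.1 else -1) := by
    simp only [minSubarray2, stA, List.take_length, PySem.List.len_eq]
  have hinv := loop_inv nums p hp (nums.length : Int) nums.length (le_refl _)
  have hsum : (nums.foldl (fun (acc : Int × List Int) x => (acc.1 + x, acc.2 ++ [acc.1 + x])) (0, [0])).1
      = nums.sum := by rw [sp_fold]; simp
  have hB : minSubarray2_alt nums p
      = (if ((PySem.List.pyRange 1 ((nums.length : Int) + 1) 1).foldl (fun best b =>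
          (PySem.List.pyRange 0 (b + 1) 1).foldl (fun best a =>
            if PySem.Int.mod (preS nums (b.toNat) - preS nums (a.toNat) - nums.sum) p = 0
            then min best (b - a) else best) best) (nums.length : Int)) < (nums.length : Int)
         then ((PySem.List.pyRange 1 ((nums.length : Int) + 1) 1).foldl (fun best b =>
          (PySem.List.pyRange 0 (b + 1) 1).foldl (fun best a =>
            if PySem.Int.mod (preS nums (b.toNat) - preS nums (a.toNat) - nums.sum) p = 0
            then min best (b - a) else best) best) (nums.length : Int)) else -1) := by
    simp only [minSubarray2_alt, PySem.List.len_eq, pref_eq, hsum]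
    have hcong : (PySem.List.pyRange 1 ((nums.length : Int) + 1) 1).foldl (fun best b =>
          (PySem.List.pyRange 0 (b + 1) 1).foldl (fun best a =>
            if PySem.Int.mod (PySem.List.pyGetD ((List.range (nums.length + 1)).map (fun k => preS nums k)) b 0
                - PySem.List.pyGetD ((List.range (nums.length + 1)).map (fun k => preS nums k)) a 0
                - nums.sum) p = 0
            then min best (b - a) else best) best) (nums.length : Int)
        = (PySem.List.pyRange 1 ((nums.length : Int) + 1) 1).foldl (fun best b =>
          (PySem.List.pyRange 0 (b + 1) 1).foldl (fun best a =>
            if PySem.Int.mod (preS nums (b.toNat) - preS nums (a.toNat) - nums.sum) p = 0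
            then min best (b - a) else best) best) (nums.length : Int) := by
      apply PySem.List.foldl_congr_mem
      intro acc b hb
      rw [PySem.List.mem_pyRange_one] at hb
      apply PySem.List.foldl_congr_mem
      intro acc2 a ha
      rw [PySem.List.mem_pyRange_one] at ha
      rw [pref_get nums b (by omega) (by omega), pref_get nums a (by omega) (by omega)]
    rw [hcong]
  rw [hA, hB, hinv.2.2]

-- ===== VERDICT (by name: the statement is the Claim_ definition above) =====
theorem minSubarray2_spec : Claim_equal_minSubarray2 := by
  intro nums p _ hpre
  unfold Spec_minSubarray2
  exact ports_agree nums p hpre
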